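-- pv_equiv track=rewrite | github.com/jdasam/qbh_project | melody_utils.py | clearing_note
-- ===== SOURCE A (Python) =====
-- def clearing_note(q_contour, min_pitch_len=5):
--     prev_pitch = 0
--     prev_pitch_start = 0
--     output = [x for x in q_contour]
--     for i in range(len(q_contour)):
--         pitch = q_contour[i]
--         if pitch != prev_pitch:
--             prev_pitch_duration = i - prev_pitch_start
--             if prev_pitch_duration < min_pitch_len:
--                 output[prev_pitch_start:i] = [0] * prev_pitch_duration
--             prev_pitch = pitch
--             prev_pitch_start = i
--     return output
-- ===== SOURCE B (Python) =====
-- def clearing_note(q_contour, min_pitch_len=5):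
--     # Stage 1: label every position with the id of the run it belongs to.
--     run_id = []
--     rid = 0
--     prev = 0
--     for x in q_contour:
--         if run_id and x != prev:
--             rid += 1
--         run_id.append(rid)
--         prev = x
--     # Stage 2: count how long each run is.
--     counts = {}
--     for r in run_id:
--         counts[r] = counts.get(r, 0) + 1
--     # Stage 3: per-element decision; rid is now the id of the LAST run,
--     # which is always kept (mirrors the original behaviour).
--     return [0 if r != rid and counts[r] < min_pitch_len else x
--             for r, x in zip(run_id, q_contour)]
-- ===== Notes on version B (the rewrite author's own statement) =====
-- stated objective: alternative
-- what changed: B replaces A's single streaming pass with slice assignment by three staged passes: label each element with a run id, build a dict of run lengths, then map each element to 0 or itself by a per-element dict lookup (last run id exempt).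
import Mathlib
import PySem

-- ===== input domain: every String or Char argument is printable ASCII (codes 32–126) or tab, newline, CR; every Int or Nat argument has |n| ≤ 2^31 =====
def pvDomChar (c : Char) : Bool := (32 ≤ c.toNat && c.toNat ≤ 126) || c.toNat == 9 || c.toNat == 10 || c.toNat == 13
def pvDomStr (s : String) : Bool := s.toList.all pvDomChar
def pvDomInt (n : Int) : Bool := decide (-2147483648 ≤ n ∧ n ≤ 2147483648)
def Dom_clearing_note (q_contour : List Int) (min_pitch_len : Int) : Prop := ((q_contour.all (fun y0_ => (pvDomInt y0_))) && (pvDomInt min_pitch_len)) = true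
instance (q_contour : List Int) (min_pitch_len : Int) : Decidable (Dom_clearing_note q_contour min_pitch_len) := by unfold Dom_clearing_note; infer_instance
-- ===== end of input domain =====

-- B replaces A's single streaming pass (slice assignment into a copied list) by three staged
-- passes: label each position with a run id, count run lengths in a dict, then decide each
-- element by a dict lookup (the last run id is exempt). Objective: alternative decomposition.
-- Neither version mutates its input.

-- ===== PORT A =====
-- one iteration of A's for-loop; state = (prev_pitch, prev_pitch_start, output).
-- q_contour[i] is ported as getD i 0: i ranges over range(len(q_contour)), so it is always
-- in range and getD is exact here.  The slice assignment output[prev_pitch_start:i] = [0]*d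
-- (with 0 ≤ prev_pitch_start ≤ i ≤ len, d = i - prev_pitch_start) is ported exactly as
-- take/replicate/drop.
def stepA (q_contour : List Int) (min_pitch_len : Int)
    (st : Int × Nat × List Int) (i : Nat) : Int × Nat × List Int :=
  let pitch := q_contour.getD i 0
  if pitch ≠ st.1 then
    let d := i - st.2.1
    let out := if (d : Int) < min_pitch_len then
        st.2.2.take st.2.1 ++ List.replicate d 0 ++ st.2.2.drop i
      else st.2.2
    (pitch, i, out)
  else st

def clearing_note (q_contour : List Int) (min_pitch_len : Int) : List Int :=
  -- output = [x for x in q_contour] is the copy q_contour itself (same values)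
  ((List.range q_contour.length).foldl (stepA q_contour min_pitch_len) (0, 0, q_contour)).2.2

-- ===== PORT B =====
-- stage-1 loop body of Source B; state = (rid, prev, run_id).  'if run_id and x != prev' is
-- the test st.2.2 ≠ [] ∧ x ≠ st.2.1 (prev starts as an arbitrary 0: Python's prev is
-- unbound then, but the guard run_id ≠ [] makes it unread).
def bStep (st : Int × Int × List Int) (x : Int) : Int × Int × List Int :=
  let rid := if st.2.2 ≠ [] ∧ x ≠ st.2.1 then st.1 + 1 else st.1
  (rid, x, st.2.2 ++ [rid])

def clearing_note_alt (q_contour : List Int) (min_pitch_len : Int) : List Int :=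
  let st := q_contour.foldl bStep (0, 0, [])
  let rid := st.1
  let run_id := st.2.2
  -- counts[r] = counts.get(r, 0) + 1 on a PySem.Dict; the later counts[r] lookup is exact
  -- as getD … 0 because every r drawn from run_id is a key of counts.
  let counts := run_id.foldl (fun d r => d.insert r (d.getD r 0 + 1)) PySem.Dict.empty
  (run_id.zip q_contour).map
    (fun p => if p.1 ≠ rid ∧ counts.getD p.1 0 < min_pitch_len then 0 else p.2)

-- ===== PRECONDITION & SPEC =====
def Spec_clearing_note (q_contour : List Int) (min_pitch_len : Int) (out : List Int) : Prop := out = clearing_note_alt q_contour min_pitch_len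
instance (q_contour : List Int) (min_pitch_len : Int) (out : List Int) : Decidable (Spec_clearing_note q_contour min_pitch_len out) := by unfold Spec_clearing_note; infer_instance

-- ===== CLAIM (what is proved, stated in full; the proofs are below) =====
def Claim_equal_clearing_note : Prop := ∀ (q_contour : List Int) (min_pitch_len : Int), Dom_clearing_note q_contour min_pitch_len → Spec_clearing_note q_contour min_pitch_len (clearing_note q_contour min_pitch_len)

-- ===== LEMMAS AND PROOFS =====

-- Both programs clear every maximal run of equal values that is shorter than min_pitch_len,
-- except the final run, which is always kept.  clearRuns is that common characterization;
-- we prove clearing_note = clearRuns (run analysis of A's fold) and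
-- clearing_note_alt = clearRuns (run analysis of B's three stages).
def clearRuns (q_contour : List Int) (min_pitch_len : Int) : List Int :=
  match q_contour with
  | [] => []
  | x :: t =>
    let run := t.takeWhile (· == x)
    let rest := t.dropWhile (· == x)
    if rest ≠ [] ∧ ((1 + run.length : Int) < min_pitch_len) then
      List.replicate (1 + run.length) 0 ++ clearRuns rest min_pitch_len
    else
      (x :: run) ++ clearRuns rest min_pitch_len
termination_by q_contour.length
decreasing_by
  all_goals exact Nat.lt_of_le_of_lt (List.length_dropWhile_le _ _) (by simp)

------------------------------------------------------------------- A = clearRuns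

-- a step whose pitch equals prev_pitch does nothing
theorem stepA_same (q : List Int) (m : Int) (st : Int × Nat × List Int) (i : Nat)
    (h : q.getD i 0 = st.1) : stepA q m st i = st := by
  have h' : q[i]?.getD 0 = st.1 := by simpa [List.getD_eq_getElem?_getD] using h
  simp [stepA, h']

theorem foldl_stepA_same (q : List Int) (m : Int) (js : List Nat) (st : Int × Nat × List Int)
    (h : ∀ i ∈ js, q.getD i 0 = st.1) :
    js.foldl (stepA q m) st = st := by
  induction js with
  | nil => rfl
  | cons j js ih =>
    simp only [List.foldl_cons, stepA_same q m st j (h j (List.mem_cons_self))]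
    exact ih (fun i hi => h i (List.mem_cons_of_mem _ hi))

-- index 0 with prev_pitch_start = 0 and output = q leaves everything but prev_pitch alone
theorem stepA_zero (q : List Int) (m : Int) (pp : Int) :
    stepA q m (pp, 0, q) 0 = (q.getD 0 0, 0, q) := by
  by_cases h : q.getD 0 0 = pp
  · rw [stepA_same q m _ 0 h, h]
  · have h' : ¬ q[0]?.getD 0 = pp := by simpa [List.getD_eq_getElem?_getD] using h
    simp [stepA, h']

theorem getD_append_len {p r : List Int} {j : Nat} :
    (p ++ r).getD (p.length + j) 0 = r.getD j 0 := by
  simp [List.getD_eq_getElem?_getD, List.getElem?_append_right (Nat.le_add_right p.length j)]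

-- one shifted step: processing index p.length + j of p ++ r, with the already-final prefix
-- p' (|p'| = |p|) in the output, is the step at index j of r
theorem stepA_shift (p p' r out : List Int) (m pp : Int) (pps j : Nat)
    (hlen : p'.length = p.length) :
    stepA (p ++ r) m (pp, p.length + pps, p' ++ out) (p.length + j) =
      (fun st => (st.1, p.length + st.2.1, p' ++ st.2.2)) (stepA r m (pp, pps, out) j) := by
  simp only [stepA, getD_append_len]
  by_cases h : r.getD j 0 = pp
  · rw [h]; simp
  · rw [if_pos h, if_pos h]
    have hd : p.length + j - (p.length + pps) = j - pps := by omega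
    rw [hd]
    simp only [Prod.mk.injEq]
    refine ⟨by trivial, by trivial, ?_⟩
    by_cases hm : ((j - pps : Nat) : Int) < m
    · rw [if_pos hm, if_pos hm]
      have h1 : (p' ++ out).take (p.length + pps) = p' ++ out.take pps := by
        rw [List.take_append, List.take_of_length_le (by omega)]
        congr 1; congr 1; omega
      have h2 : (p' ++ out).drop (p.length + j) = out.drop j := by
        rw [List.drop_append, List.drop_eq_nil_of_le (by omega)]
        simp only [List.nil_append]; congr 1; omega
      rw [h1, h2]
      simp
    · rw [if_neg hm, if_neg hm]

theorem foldl_stepA_shift (p p' r : List Int) (m : Int) (js : List Nat) :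
    ∀ (pp : Int) (pps : Nat) (out : List Int), p'.length = p.length →
    (js.map (p.length + ·)).foldl (stepA (p ++ r) m) (pp, p.length + pps, p' ++ out) =
      (fun st => (st.1, p.length + st.2.1, p' ++ st.2.2)) (js.foldl (stepA r m) (pp, pps, out)) := by
  induction js with
  | nil => intro pp pps out _; rfl
  | cons j js ih =>
    intro pp pps out h
    simp only [List.map_cons, List.foldl_cons, stepA_shift p p' r out m pp pps j h]
    obtain ⟨a, b, c⟩ := stepA r m (pp, pps, out) j
    exact ih a b c h

-- the head of dropWhile fails the predicate
theorem dropWhile_head_false {α : Type} (p : α → Bool) (l : List α) (y : α) (ys : List α)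
    (h : l.dropWhile p = y :: ys) : p y = false := by
  induction l with
  | nil => simp at h
  | cons a l ih =>
    rw [List.dropWhile_cons] at h
    by_cases hp : p a
    · exact ih (by simpa [hp] using h)
    · simp [hp] at h
      rw [← h.1]
      simpa using hp

-- reading an index inside the leading all-x run gives x
theorem getD_run (x : Int) (run rest : List Int) (j : Nat)
    (hrunx : ∀ a ∈ run, a = x) (hj : j < run.length) :
    (x :: (run ++ rest)).getD (1 + j) 0 = x := by
  rw [Nat.add_comm 1 j, List.getD_cons_succ]
  rw [List.getD_eq_getElem?_getD, List.getElem?_append_left hj]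
  simp only [List.getElem?_eq_getElem hj, Option.getD_some]
  exact hrunx _ (List.getElem_mem hj)

-- after processing the whole leading run (indices 0 .. run.length), the state is (x, 0, q)
theorem fold_first_run (x : Int) (m : Int) (run rest q : List Int)
    (hq : q = x :: (run ++ rest)) (hrunx : ∀ a ∈ run, a = x) :
    (List.range (run.length + 1)).foldl (stepA q m) (0, 0, q) = (x, 0, q) := by
  rw [Nat.add_comm run.length 1, List.range_add, List.foldl_append]
  have h0 : (List.range 1).foldl (stepA q m) (0, 0, q) = (x, 0, q) := by
    have hx : q.getD 0 0 = x := by rw [hq]; rfl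
    rw [List.range_one, List.foldl_cons, List.foldl_nil, stepA_zero q m 0, hx]
  rw [h0]
  apply foldl_stepA_same
  intro i hi
  simp only [List.mem_map, List.mem_range] at hi
  obtain ⟨j, hj, rfl⟩ := hi
  rw [hq]
  exact getD_run x run rest j hrunx hj

-- A on a single all-x run returns it untouched (the final run is never cleared)
theorem clearing_note_last_run (x : Int) (m : Int) (run : List Int)
    (hrunx : ∀ a ∈ run, a = x) :
    clearing_note (x :: run) m = x :: run := by
  unfold clearing_note
  have hlen : (x :: run).length = run.length + 1 := by simp
  rw [hlen, fold_first_run x m run [] (x :: run) (by simp) hrunx]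

-- A clears (or keeps) the leading run and proceeds exactly as it would on the rest
theorem clearing_note_cons_run (x y : Int) (m : Int) (run ys : List Int)
    (hrunx : ∀ a ∈ run, a = x) (hy : y ≠ x) :
    clearing_note (x :: (run ++ y :: ys)) m =
      (if ((run.length + 1 : Nat) : Int) < m then List.replicate (run.length + 1) 0
       else x :: run) ++ clearing_note (y :: ys) m := by
  have hq : x :: (run ++ y :: ys) = (x :: run) ++ (y :: ys) := by simp
  unfold clearing_note
  have hlen : (x :: (run ++ y :: ys)).length = (run.length + 1) + (ys.length + 1) := by
    simp; omega
  rw [hlen, List.range_add, List.foldl_append,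
    fold_first_run x m run (y :: ys) _ rfl hrunx]
  rw [Nat.add_comm ys.length 1, List.range_add,
    List.map_append, List.foldl_append]
  have hget : (x :: (run ++ y :: ys)).getD (run.length + 1) 0 = y := by
    rw [List.getD_cons_succ, show run.length = run.length + 0 from rfl, getD_append_len,
      List.getD_cons_zero]
  have hdrop : (x :: (run ++ y :: ys)).drop (run.length + 1) = y :: ys := by
    rw [List.drop_succ_cons, List.drop_left]
  have hstep : (List.map (fun x => run.length + 1 + x) (List.range 1)).foldl
      (stepA (x :: (run ++ y :: ys)) m) (x, 0, x :: (run ++ y :: ys)) =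
      (y, run.length + 1,
        (if ((run.length + 1 : Nat) : Int) < m then List.replicate (run.length + 1) 0
         else x :: run) ++ (y :: ys)) := by
    simp only [List.range_one, List.map_cons, List.map_nil, List.foldl_cons, List.foldl_nil,
      Nat.add_zero]
    simp only [stepA, hget, ne_eq, hy, not_false_eq_true, if_pos, Nat.sub_zero, List.take_zero,
      List.nil_append, hdrop]
    by_cases hm : ((run.length + 1 : Nat) : Int) < m
    · rw [if_pos hm, if_pos hm]
    · rw [if_neg hm, if_neg hm, hq]
  rw [hstep]
  have hmm : (List.map (fun x => run.length + 1 + x) (List.map (fun x => 1 + x) (List.range ys.length)))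
      = (List.map (fun x => 1 + x) (List.range ys.length)).map ((x :: run).length + ·) := by
    simp
  rw [hmm, hq,
    show (run.length + 1 : Nat) = (x :: run).length + 0 by simp,
    foldl_stepA_shift (x :: run) _ (y :: ys) m _ y 0 (y :: ys) (by split <;> simp)]
  have hrest : (List.range (y :: ys).length).foldl (stepA (y :: ys) m) (0, 0, y :: ys) =
      (List.map (fun x => 1 + x) (List.range ys.length)).foldl (stepA (y :: ys) m) (y, 0, y :: ys) := by
    rw [show (y :: ys).length = 1 + ys.length by
        rw [List.length_cons]; exact Nat.add_comm ys.length 1,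
      List.range_add, List.foldl_append]
    have h0 : (List.range 1).foldl (stepA (y :: ys) m) (0, 0, y :: ys) = (y, 0, y :: ys) := by
      rw [List.range_one, List.foldl_cons, List.foldl_nil, stepA_zero (y :: ys) m 0]
      rfl
    rw [h0]
  rw [hrest]

-- A = clearRuns, by strong induction on length via the run characterization
theorem a_eq_clearRuns : ∀ (n : Nat) (q : List Int) (m : Int), q.length ≤ n →
    clearing_note q m = clearRuns q m := by
  intro n
  induction n with
  | zero =>
    intro q m hq
    have hq0 : q = [] := List.eq_nil_of_length_eq_zero (Nat.le_zero.mp hq)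
    subst hq0
    rw [clearRuns]
    simp [clearing_note]
  | succ n ih =>
    intro q m hq
    match q with
    | [] =>
      rw [clearRuns]
      simp [clearing_note]
    | x :: t =>
      rw [clearRuns]
      have hrunx : ∀ a ∈ t.takeWhile (· == x), a = x := by
        intro a ha
        simpa using List.mem_takeWhile_imp ha
      have htw : t = t.takeWhile (· == x) ++ t.dropWhile (· == x) :=
        (List.takeWhile_append_dropWhile).symm
      cases hrest : t.dropWhile (· == x) with
      | nil =>
        have ht : t = t.takeWhile (· == x) := by
          conv_lhs => rw [htw, hrest]
          rw [List.append_nil]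
        have hA : clearing_note (x :: t) m = x :: t := by
          have h1 := clearing_note_last_run x m (t.takeWhile (· == x)) hrunx
          rw [← ht] at h1
          exact h1
        have halt : clearRuns [] m = [] := by rw [clearRuns]
        rw [if_neg (by simp), halt, List.append_nil, ← ht, hA]
      | cons y ys =>
        have hy : y ≠ x := by
          have := dropWhile_head_false (· == x) t y ys hrest
          simpa using this
        have hA : clearing_note (x :: t) m =
            (if (((t.takeWhile (· == x)).length + 1 : Nat) : Int) < m then
              List.replicate ((t.takeWhile (· == x)).length + 1) 0
             else x :: t.takeWhile (· == x)) ++ clearing_note (y :: ys) m := by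
          conv_lhs => rw [htw, hrest]
          exact clearing_note_cons_run x y m _ ys hrunx hy
        have hrec : clearing_note (y :: ys) m = clearRuns (y :: ys) m := by
          apply ih
          have h1 := List.length_dropWhile_le (· == x) t
          rw [hrest] at h1
          have h2 : (y :: ys).length = ys.length + 1 := by simp
          have h3 : (x :: t).length = t.length + 1 := by simp
          rw [h2] at h1 ⊢
          rw [h3] at hq
          omega
        rw [hA, hrec]
        by_cases hm : (1 + ((t.takeWhile (· == x)).length : Int)) < m
        · rw [if_pos (show (((t.takeWhile (· == x)).length + 1 : Nat) : Int) < m by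
              push_cast; omega),
            if_pos (⟨List.cons_ne_nil y ys, hm⟩ :
              (y :: ys ≠ [] ∧ (1 + ((t.takeWhile (· == x)).length : Int)) < m)),
            Nat.add_comm ((t.takeWhile (· == x)).length) 1]
        · rw [if_neg (show ¬ (((t.takeWhile (· == x)).length + 1 : Nat) : Int) < m by
              push_cast; omega),
            if_neg (fun hc => hm hc.2), List.cons_append]

------------------------------------------------------------------- B = clearRuns

-- the run-id stream of B's stage-1 loop, as a plain recursion: runSpec rid prev l =
-- (final rid, the ids appended for l) when the list so far is nonempty with last value prev
def runSpec (rid prev : Int) : List Int → Int × List Int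
  | [] => (rid, [])
  | x :: xs =>
    let r := if x ≠ prev then rid + 1 else rid
    let t := runSpec r x xs
    (t.1, r :: t.2)

theorem foldl_bStep_spec (l : List Int) : ∀ (rid prev : Int) (acc : List Int), acc ≠ [] →
    l.foldl bStep (rid, prev, acc) =
      ((runSpec rid prev l).1, l.getLastD prev, acc ++ (runSpec rid prev l).2) := by
  induction l with
  | nil => intro rid prev acc _; simp [runSpec]
  | cons x xs ih =>
    intro rid prev acc hacc
    rw [List.foldl_cons]
    have hb : bStep (rid, prev, acc) x =
        (if x ≠ prev then rid + 1 else rid, x, acc ++ [if x ≠ prev then rid + 1 else rid]) := by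
      simp [bStep, hacc]
    rw [hb, ih _ x _ (by simp)]
    conv_rhs => rw [show runSpec rid prev (x :: xs) =
      ((runSpec (if x ≠ prev then rid + 1 else rid) x xs).1,
       (if x ≠ prev then rid + 1 else rid) ::
         (runSpec (if x ≠ prev then rid + 1 else rid) x xs).2) from rfl]
    rw [show (x :: xs).getLastD prev = xs.getLastD x from by cases xs <;> simp [List.getLastD]]
    simp

-- B's per-position run ids and last run id
def bIds (q : List Int) : List Int :=
  match q with
  | [] => []
  | x :: t => 0 :: (runSpec 0 x t).2

def bRid (q : List Int) : Int :=
  match q with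
  | [] => 0
  | x :: t => (runSpec 0 x t).1

-- stage 2+3 of B, in terms of bIds/bRid and List.count instead of the dict
theorem alt_eq_outB (q : List Int) (m : Int) :
    clearing_note_alt q m = ((bIds q).zip q).map
      (fun p => if p.1 ≠ bRid q ∧ (((bIds q).count p.1 : Int)) < m then 0 else p.2) := by
  match q with
  | [] => rfl
  | x :: t =>
    have hb : List.foldl bStep (0, 0, []) (x :: t) =
        ((runSpec 0 x t).1, t.getLastD x, [0] ++ (runSpec 0 x t).2) := by
      rw [List.foldl_cons, show bStep (0, 0, []) x = (0, x, [0]) from by simp [bStep],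
        foldl_bStep_spec t 0 x [0] (by simp)]
    simp only [clearing_note_alt, hb, List.singleton_append]
    simp only [bIds, bRid]
    congr 1
    funext p
    rw [PySem.Dict.foldl_insert_getD_add_one_eq_counter, PySem.Dict.getD_counter]
    rfl

theorem runSpec_length (prev : Int) (l : List Int) : ∀ rid, (runSpec rid prev l).2.length = l.length := by
  induction l generalizing prev with
  | nil => intro rid; simp [runSpec]
  | cons x xs ih => intro rid; simp [runSpec, ih x]

theorem bIds_length (q : List Int) : (bIds q).length = q.length := by
  match q with
  | [] => rfl
  | x :: t => simp [bIds, runSpec_length]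

theorem runSpec_fst_ge (prev : Int) (l : List Int) : ∀ rid, rid ≤ (runSpec rid prev l).1 := by
  induction l generalizing prev with
  | nil => intro rid; simp [runSpec]
  | cons x xs ih =>
    intro rid
    simp only [runSpec]
    split
    · exact le_trans (by omega) (ih x (rid + 1))
    · exact ih x rid

theorem runSpec_mem_ge (prev : Int) (l : List Int) :
    ∀ rid a, a ∈ (runSpec rid prev l).2 → rid ≤ a := by
  induction l generalizing prev with
  | nil => intro rid a ha; simp [runSpec] at ha
  | cons x xs ih =>
    intro rid a ha
    simp only [runSpec, List.mem_cons] at ha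
    rcases ha with rfl | ha
    · split <;> omega
    · split at ha
      · exact le_trans (by omega) (ih x (rid + 1) a ha)
      · exact ih x rid a ha

-- a leading all-prev run contributes |run| copies of rid
theorem runSpec_run (run : List Int) : ∀ (rid prev : Int) (l : List Int), (∀ a ∈ run, a = prev) →
    runSpec rid prev (run ++ l) =
      ((runSpec rid prev l).1, List.replicate run.length rid ++ (runSpec rid prev l).2) := by
  induction run with
  | nil => intro rid prev l _; simp
  | cons a run ih =>
    intro rid prev l h
    have ha : a = prev := h a (List.mem_cons_self)
    subst ha
    simp only [List.cons_append, runSpec, ne_eq, not_true_eq_false, if_false]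
    rw [ih rid a l (fun b hb => h b (List.mem_cons_of_mem _ hb))]
    simp [List.replicate_succ]

-- shifting the starting id shifts everything by one
theorem runSpec_shift (l : List Int) : ∀ (rid prev : Int),
    runSpec (rid + 1) prev l =
      ((runSpec rid prev l).1 + 1, (runSpec rid prev l).2.map (· + 1)) := by
  induction l with
  | nil => intro rid prev; simp [runSpec]
  | cons x xs ih =>
    intro rid prev
    simp only [runSpec]
    split
    · rw [ih (rid + 1) x]; simp
    · rw [ih rid x]; simp

theorem runSpec_shift1 (l : List Int) (prev : Int) :
    runSpec 1 prev l =
      ((runSpec 0 prev l).1 + 1, (runSpec 0 prev l).2.map (· + 1)) := by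
  have h := runSpec_shift l 0 prev
  rwa [zero_add] at h

-- structure of bIds / bRid over the leading run
theorem bIds_cons_run (x y : Int) (run ys : List Int)
    (hrunx : ∀ a ∈ run, a = x) (hy : y ≠ x) :
    bIds (x :: (run ++ y :: ys)) =
      List.replicate (1 + run.length) 0 ++ (bIds (y :: ys)).map (· + 1) := by
  simp only [bIds]
  rw [runSpec_run run 0 x (y :: ys) hrunx]
  simp only [runSpec, ne_eq, hy, not_false_eq_true, if_pos, zero_add]
  rw [runSpec_shift1 ys y, List.replicate_add]
  simp

theorem bRid_cons_run (x y : Int) (run ys : List Int)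
    (hrunx : ∀ a ∈ run, a = x) (hy : y ≠ x) :
    bRid (x :: (run ++ y :: ys)) = bRid (y :: ys) + 1 := by
  simp only [bRid]
  rw [runSpec_run run 0 x (y :: ys) hrunx]
  simp only [runSpec, ne_eq, hy, not_false_eq_true, if_pos, zero_add]
  rw [runSpec_shift1 ys y]

theorem bIds_last_run (x : Int) (run : List Int) (hrunx : ∀ a ∈ run, a = x) :
    bIds (x :: run) = List.replicate (1 + run.length) 0 ∧ bRid (x :: run) = 0 := by
  constructor
  · simp only [bIds]
    rw [show run = run ++ [] by simp, runSpec_run run 0 x [] hrunx]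
    rw [List.replicate_add]
    simp [runSpec]
  · simp only [bRid]
    rw [show run = run ++ [] by simp, runSpec_run run 0 x [] hrunx]
    simp [runSpec]

theorem bIds_nonneg (q : List Int) : ∀ a ∈ bIds q, 0 ≤ a := by
  match q with
  | [] => simp [bIds]
  | x :: t =>
    intro a ha
    simp only [bIds, List.mem_cons] at ha
    rcases ha with rfl | ha
    · omega
    · exact runSpec_mem_ge x t 0 a ha

theorem bRid_nonneg (q : List Int) : 0 ≤ bRid q := by
  match q with
  | [] => simp [bRid]
  | x :: t => exact runSpec_fst_ge x t 0

-- mapping a uniform decision over a zip with a constant-id prefix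
theorem zip_replicate_map (f : Int × Int → Int) (c : Int) :
    ∀ (n : Nat) (l : List Int), n = l.length →
    ((List.replicate n c).zip l).map f = l.map (fun v => f (c, v)) := by
  intro n
  induction n with
  | zero =>
    intro l hl
    rw [List.eq_nil_of_length_eq_zero hl.symm]
    rfl
  | succ n ih =>
    intro l hl
    match l with
    | [] => simp at hl
    | v :: l => simp only [List.replicate_succ, List.zip_cons_cons, List.map_cons,
        ih l (by simpa using hl)]

-- B = clearRuns, by strong induction on length via the run characterization
theorem b_eq_clearRuns : ∀ (n : Nat) (q : List Int) (m : Int), q.length ≤ n →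
    clearing_note_alt q m = clearRuns q m := by
  intro n
  induction n with
  | zero =>
    intro q m hq
    have hq0 : q = [] := List.eq_nil_of_length_eq_zero (Nat.le_zero.mp hq)
    subst hq0
    rw [clearRuns]
    rfl
  | succ n ih =>
    intro q m hq
    match q with
    | [] => rw [clearRuns]; rfl
    | x :: t =>
      rw [clearRuns, alt_eq_outB]
      have hrunx : ∀ a ∈ t.takeWhile (· == x), a = x := by
        intro a ha
        simpa using List.mem_takeWhile_imp ha
      have htw : t = t.takeWhile (· == x) ++ t.dropWhile (· == x) :=
        (List.takeWhile_append_dropWhile).symm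
      set run := t.takeWhile (· == x) with hrun
      cases hrest : t.dropWhile (· == x) with
      | nil =>
        -- a single final run: everything kept
        have ht : t = run := by conv_lhs => rw [htw, hrest, List.append_nil]
        obtain ⟨hids, hrid⟩ := bIds_last_run x run hrunx
        rw [if_neg (by simp), ht, hids, hrid]
        rw [zip_replicate_map _ 0 (1 + run.length) (x :: run) (by simp; omega)]
        have hz : clearRuns [] m = [] := by rw [clearRuns]
        rw [hz, List.append_nil]
        simp
      | cons y ys =>
        have hy : y ≠ x := by
          have := dropWhile_head_false (· == x) t y ys hrest
          simpa using this
        have hteq : t = run ++ y :: ys := by conv_lhs => rw [htw, hrest]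
        have hids := bIds_cons_run x y run ys hrunx hy
        have hridq := bRid_cons_run x y run ys hrunx hy
        have hlen_ids : (bIds (y :: ys)).length = ys.length + 1 := by
          rw [bIds_length]; simp
        -- split the zip into head run and rest
        have hzip : (bIds (x :: (run ++ y :: ys))).zip (x :: (run ++ y :: ys)) =
            ((List.replicate (1 + run.length) 0).zip (x :: run)) ++
            (((bIds (y :: ys)).map (· + 1)).zip (y :: ys)) := by
          rw [hids, show (x :: (run ++ y :: ys)) = (x :: run) ++ (y :: ys) by simp]
          exact List.zip_append (by simp [List.length_replicate]; omega)
        -- counts in the full id list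
        have hcount0 : (bIds (x :: (run ++ y :: ys))).count 0 = 1 + run.length := by
          rw [hids, List.count_append, List.count_replicate_self, List.count_eq_zero.mpr]
          · omega
          · intro hmem
            simp only [List.mem_map] at hmem
            obtain ⟨a, ha, hae⟩ := hmem
            have := bIds_nonneg (y :: ys) a ha
            omega
        have hcountS : ∀ r, 0 ≤ r → (bIds (x :: (run ++ y :: ys))).count (r + 1) =
            (bIds (y :: ys)).count r := by
          intro r hr
          rw [hids, List.count_append, List.count_replicate, if_neg (by simp; omega),
            Nat.zero_add]
          simpa using List.count_map_of_injective (bIds (y :: ys)) (fun a => a + 1)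
            (fun a b h => by simp at h; omega) r
        have hrid_pos : bRid (x :: (run ++ y :: ys)) ≠ 0 := by
          have := bRid_nonneg (y :: ys); omega
        rw [hteq, hzip, List.map_append]
        -- head segment
        have hhead : ((List.replicate (1 + run.length) 0).zip (x :: run)).map
            (fun p => if p.1 ≠ bRid (x :: (run ++ y :: ys)) ∧
              (((bIds (x :: (run ++ y :: ys))).count p.1 : Int)) < m then 0 else p.2) =
            (if ((1 + run.length : Nat) : Int) < m then List.replicate (1 + run.length) 0
             else x :: run) := by
          rw [zip_replicate_map _ 0 (1 + run.length) (x :: run) (by simp; omega)]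
          by_cases hm : ((1 + run.length : Nat) : Int) < m
          · rw [if_pos hm]
            have : ∀ v : Int, (if (0 : Int) ≠ bRid (x :: (run ++ y :: ys)) ∧
                (((bIds (x :: (run ++ y :: ys))).count 0 : Int)) < m then (0:Int) else v) = 0 := by
              intro v
              rw [if_pos ⟨fun hc => hrid_pos hc.symm, by rw [hcount0]; exact_mod_cast hm⟩]
            simp only [this]
            simp [List.map_const', List.eq_replicate_iff]
            omega
          · rw [if_neg hm]
            have : ∀ v : Int, (if (0 : Int) ≠ bRid (x :: (run ++ y :: ys)) ∧
                (((bIds (x :: (run ++ y :: ys))).count 0 : Int)) < m then (0:Int) else v) = v := by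
              intro v
              rw [if_neg]
              intro hc
              exact hm (by rw [hcount0] at hc; exact_mod_cast hc.2)
            simp only [this, List.map_id']
        -- tail segment
        have htail : (((bIds (y :: ys)).map (· + 1)).zip (y :: ys)).map
            (fun p => if p.1 ≠ bRid (x :: (run ++ y :: ys)) ∧
              (((bIds (x :: (run ++ y :: ys))).count p.1 : Int)) < m then 0 else p.2) =
            clearRuns (y :: ys) m := by
          rw [List.zip_map_left, List.map_map]
          have hptwise : ∀ p ∈ (bIds (y :: ys)).zip (y :: ys),
              (if p.1 + 1 ≠ bRid (x :: (run ++ y :: ys)) ∧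
                (((bIds (x :: (run ++ y :: ys))).count (p.1 + 1) : Int)) < m then (0:Int) else p.2) =
              (if p.1 ≠ bRid (y :: ys) ∧ (((bIds (y :: ys)).count p.1 : Int)) < m then 0 else p.2) := by
            intro p hp
            have hp1 : p.1 ∈ bIds (y :: ys) := (List.of_mem_zip hp).1
            have hp1n : 0 ≤ p.1 := bIds_nonneg _ _ hp1
            rw [hcountS p.1 hp1n, hridq]
            congr 1
            simp only [eq_iff_iff, and_congr_left_iff]
            intro _
            constructor
            · intro h hc; exact h (by omega)
            · intro h hc; exact h (by omega)
          calc ((bIds (y :: ys)).zip (y :: ys)).map _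
              = ((bIds (y :: ys)).zip (y :: ys)).map
                (fun p => if p.1 ≠ bRid (y :: ys) ∧ (((bIds (y :: ys)).count p.1 : Int)) < m
                  then 0 else p.2) := List.map_congr_left hptwise
            _ = clearing_note_alt (y :: ys) m := (alt_eq_outB (y :: ys) m).symm
            _ = clearRuns (y :: ys) m := by
                apply ih
                have h1 := List.length_dropWhile_le (· == x) t
                rw [hrest] at h1
                simp only [List.length_cons] at h1 hq ⊢
                omega
        rw [hhead, htail]
        by_cases hm : ((1 + run.length : Int)) < m
        · rw [if_pos (show ((1 + run.length : Nat) : Int) < m by push_cast; omega),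
            if_pos ⟨List.cons_ne_nil y ys, hm⟩]
        · rw [if_neg (show ¬ ((1 + run.length : Nat) : Int) < m by push_cast; omega),
            if_neg (fun hc => hm hc.2)]

-- ===== VERDICT (by name: the statement is the Claim_ definition above) =====
theorem clearing_note_spec : Claim_equal_clearing_note := by
  intro q m _
  unfold Spec_clearing_note
  rw [a_eq_clearRuns q.length q m (Nat.le_refl _), b_eq_clearRuns q.length q m (Nat.le_refl _)]
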